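-- pv_equiv track=rewrite | github.com/LeoTheMoldyLemon/Advent-of-Code | 2021/18.py | get_last_value
-- ===== SOURCE A (Python) =====
-- def get_last_value(full_pair_str, idx):
--     # Get last numeric value up to index idx, returns it and its index and its end index
--     # If none exists, returns None, None
--     value = ""
--     for j in range(idx, -1, -1):
--         ch = full_pair_str[j]
--         if ch.isdigit():
--             k = j
--             while full_pair_str[k].isdigit():
--                 value = full_pair_str[k] + value
--                 k -= 1
--             return (
--                 int(value),
--                 (k + 1, j + 1),
--             )
--     return None, None
-- ===== SOURCE B (Python) =====
-- def get_last_value(full_pair_str, idx):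
--     # Single forward pass: track the current digit run and remember the last completed one.
--     best = (None, None)
--     start = 0
--     run = ""
--     for j in range(idx + 1):
--         ch = full_pair_str[j]
--         if ch.isdigit():
--             if not run:
--                 start = j
--             run += ch
--         elif run:
--             best = (int(run), (start, j))
--             run = ""
--     if run:
--         best = (int(run), (start, idx + 1))
--     return best
-- ===== Notes on version B (the rewrite author's own statement) =====
-- stated objective: alternative
-- what changed: B replaces A's backward scan (reverse outer loop plus an inner backward digit scan that can wrap around via negative indexing) with a single forward pass over s[0..idx] that tracks the current digit run and remembers the last completed one.
-- intended difference: When the digit run at/before idx reaches index 0 and the string's last character is also a digit, A's inner scan wraps around via Python negative indexing and returns extra digits glued in front with a negative span start (A('1 2',0) = (21,(-1,1))), while B returns the run itself ((1,(0,1))), the intended 'last numeric value up to idx'. — e.g. on get_last_value("1 2", 0): A returns (some 21, some (-1, 1)), B returns (some 1, some (0, 1))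
import Mathlib
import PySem

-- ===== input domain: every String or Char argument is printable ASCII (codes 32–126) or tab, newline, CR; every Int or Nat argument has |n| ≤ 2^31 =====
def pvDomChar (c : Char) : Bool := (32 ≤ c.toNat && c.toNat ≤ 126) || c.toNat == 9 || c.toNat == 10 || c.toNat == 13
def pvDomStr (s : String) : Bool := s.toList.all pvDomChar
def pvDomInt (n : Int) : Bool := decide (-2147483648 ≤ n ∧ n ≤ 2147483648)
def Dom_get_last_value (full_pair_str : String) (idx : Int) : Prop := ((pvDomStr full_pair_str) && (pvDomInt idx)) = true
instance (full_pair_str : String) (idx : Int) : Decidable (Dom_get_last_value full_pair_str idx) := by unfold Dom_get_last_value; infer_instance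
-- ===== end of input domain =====

-- B does a single forward pass over s[0..idx] instead of A's backward scan with an inner backward digit scan;
-- return-value equivalence, stated outside the negative-index wraparound corner D_ (where B's value is the intended one).

-- int(run) for a nonempty run of digit characters; the .getD 0 default is never reached on such runs.
def pyIntOfDigits (cs : List Char) : Int := (PySem.Int.ofChars? cs).getD 0

-- ===== PORT A =====
-- inner `while full_pair_str[k].isdigit(): value = full_pair_str[k] + value; k -= 1`
-- (fuel is an exact bound on the remaining iterations, a totalization guard only:
--  the fuel-0 branch returns what the loop exit returns and is never the source of a wrong value)
def aInner (s : List Char) (fuel : Nat) (k : Int) (value : List Char) : Int × List Char :=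
  if k + (s.length : Int) < 0 then (k, value)  -- Python raises IndexError here (outside Pre_)
  else
    match fuel with
    | 0 => (k, value)
    | fuel + 1 =>
      match PySem.List.pyGet? s k with
      | none => (k, value)  -- unreachable: k only ever decreases from an in-range index
      | some c =>
        if PySem.Chars.isdigit c then aInner s fuel (k - 1) (c :: value) else (k, value)

-- outer `for j in range(idx, -1, -1)`
def aOuter (s : List Char) (fuel : Nat) (j : Int) : Option Int × Option (Int × Int) :=
  if j < 0 then (none, none)
  else
    match fuel with
    | 0 => (none, none)  -- unreachable: fuel = j + 1 on entry
    | fuel + 1 =>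
      match PySem.List.pyGet? s j with
      | none => (none, none)  -- Python raises IndexError here (outside Pre_)
      | some c =>
        if PySem.Chars.isdigit c then
          (some (pyIntOfDigits (aInner s (j + s.length + 1).toNat j []).2),
           some ((aInner s (j + s.length + 1).toNat j []).1 + 1, j + 1))
        else aOuter s fuel (j - 1)

def get_last_value (full_pair_str : String) (idx : Int) : Option Int × (Option (Int × Int)) :=
  aOuter full_pair_str.toList (idx + 1).toNat idx

-- ===== PORT B =====
-- `for j in range(idx + 1)` with state (best, start, run), then close the run still open at idx
-- (fuel = number of remaining loop iterations, again only a totalization guard)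
def bLoop (s : List Char) (idx : Int) (fuel : Nat) (j : Int) (best : Option Int × Option (Int × Int))
    (start : Int) (run : List Char) : Option Int × Option (Int × Int) :=
  if idx + 1 ≤ j then
    if run.isEmpty then best else (some (pyIntOfDigits run), some (start, idx + 1))
  else
    match fuel with
    | 0 => best  -- unreachable: fuel = idx + 1 - j on entry
    | fuel + 1 =>
      match PySem.List.pyGet? s j with
      | none => best  -- Python raises IndexError here (outside Pre_)
      | some c =>
        if PySem.Chars.isdigit c then
          bLoop s idx fuel (j + 1) best (if run.isEmpty then j else start) (run ++ [c])
        else if run.isEmpty then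
          bLoop s idx fuel (j + 1) best start run
        else
          bLoop s idx fuel (j + 1) (some (pyIntOfDigits run), some (start, j)) start []

def get_last_value_alt (full_pair_str : String) (idx : Int) : Option Int × (Option (Int × Int)) :=
  bLoop full_pair_str.toList idx (idx + 1).toNat 0 (none, none) 0 []

-- ===== PRECONDITION & SPEC =====
-- Pre_ excludes exactly the inputs on which A raises IndexError: idx ≥ len(s), and
-- all-digit strings with 0 ≤ idx < len(s) (A's inner scan wraps around and walks past the left end).
def Pre_get_last_value (full_pair_str : String) (idx : Int) : Prop :=
  idx < (full_pair_str.toList.length : Int) ∧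
  (0 ≤ idx → full_pair_str.toList.all PySem.Chars.isdigit = false)
instance (full_pair_str : String) (idx : Int) : Decidable (Pre_get_last_value full_pair_str idx) := by
  unfold Pre_get_last_value; infer_instance

def pvWitness_get_last_value : String × Int := ("a12b", 2)

-- When the digit run at/before idx reaches index 0 and the last character of s is also a digit,
-- A wraps around via negative indexing and returns extra digits with a negative span start,
-- while B returns the run itself, the intended "last numeric value up to idx".
def D_get_last_value (full_pair_str : String) (idx : Int) : Prop :=
  0 ≤ idx ∧ idx < (full_pair_str.toList.length : Int) ∧
  PySem.Chars.isdigit (full_pair_str.toList.getD 0 ' ') = true ∧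
  (∀ i ≤ idx.toNat, 1 ≤ i → PySem.Chars.isdigit (full_pair_str.toList.getD i ' ') = true →
      PySem.Chars.isdigit (full_pair_str.toList.getD (i - 1) ' ') = true) ∧
  PySem.Chars.isdigit ((full_pair_str.toList.getLast?).getD ' ') = true ∧
  full_pair_str.toList.all PySem.Chars.isdigit = false
instance (full_pair_str : String) (idx : Int) : Decidable (D_get_last_value full_pair_str idx) := by
  unfold D_get_last_value; infer_instance

def Spec_get_last_value (full_pair_str : String) (idx : Int) (out : Option Int × (Option (Int × Int))) : Prop :=
  ¬ D_get_last_value full_pair_str idx → out = get_last_value_alt full_pair_str idx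
instance (full_pair_str : String) (idx : Int) (out : Option Int × (Option (Int × Int))) : Decidable (Spec_get_last_value full_pair_str idx out) := by
  unfold Spec_get_last_value; infer_instance

def pvDiffWitness_get_last_value : String × Int := ("1 2", 0)
def pvDiffWitnessOut_get_last_value : (Option Int × (Option (Int × Int))) × (Option Int × (Option (Int × Int))) :=
  ((some 21, some (-1, 1)), (some 1, some (0, 1)))

-- ===== CLAIM (what is proved, stated in full; the proofs are below) =====
def Claim_unchanged_get_last_value : Prop := ∀ (full_pair_str : String) (idx : Int), Dom_get_last_value full_pair_str idx → Pre_get_last_value full_pair_str idx → Spec_get_last_value full_pair_str idx (get_last_value full_pair_str idx)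
def Claim_changed_get_last_value : Prop := Dom_get_last_value (pvDiffWitness_get_last_value.1) (pvDiffWitness_get_last_value.2) ∧ Pre_get_last_value (pvDiffWitness_get_last_value.1) (pvDiffWitness_get_last_value.2) ∧ D_get_last_value (pvDiffWitness_get_last_value.1) (pvDiffWitness_get_last_value.2) ∧ get_last_value (pvDiffWitness_get_last_value.1) (pvDiffWitness_get_last_value.2) = pvDiffWitnessOut_get_last_value.1 ∧ get_last_value_alt (pvDiffWitness_get_last_value.1) (pvDiffWitness_get_last_value.2) = pvDiffWitnessOut_get_last_value.2 ∧ pvDiffWitnessOut_get_last_value.1 ≠ pvDiffWitnessOut_get_last_value.2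
def Claim_exact_get_last_value : Prop := ∀ (full_pair_str : String) (idx : Int), Dom_get_last_value full_pair_str idx → Pre_get_last_value full_pair_str idx → D_get_last_value full_pair_str idx → get_last_value full_pair_str idx ≠ get_last_value_alt full_pair_str idx

-- ===== LEMMAS AND PROOFS =====

-- Proof-side model of B's loop state: (best, start, run) after processing s[0..j-1].
def stepSt (st8 : (Option Int × Option (Int × Int)) × Int × List Char) (j : Int) (c : Char) :
    (Option Int × Option (Int × Int)) × Int × List Char :=
  if PySem.Chars.isdigit c then
    (st8.1, (if st8.2.2.isEmpty then j else st8.2.1), st8.2.2 ++ [c])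
  else if st8.2.2.isEmpty then st8
  else ((some (pyIntOfDigits st8.2.2), some (st8.2.1, j)), st8.2.1, ([] : List Char))

def stateAt (l : List Char) : Nat → (Option Int × Option (Int × Int)) × Int × List Char
  | 0 => ((none, none), 0, [])
  | j + 1 => stepSt (stateAt l j) j (l.getD j ' ')

def finalizeSt (st8 : (Option Int × Option (Int × Int)) × Int × List Char) (m : Int) :
    Option Int × Option (Int × Int) :=
  if st8.2.2.isEmpty then st8.1 else (some (pyIntOfDigits st8.2.2), some (st8.2.1, m + 1))

theorem drop_take_self (l : List Char) (j : Nat) : (l.take j).drop j = [] := by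
  rw [List.drop_take]
  simp

theorem take_succ_getElem (l : List Char) (j : Nat) (h : j < l.length) :
    l.take (j + 1) = l.take j ++ [l[j]] := by
  rw [List.take_add_one]
  simp [List.getElem?_eq_getElem h]

theorem drop_take_succ (l : List Char) (j st : Nat) (h : j < l.length) (hst : st ≤ j) :
    (l.take (j + 1)).drop st = (l.take j).drop st ++ [l[j]] := by
  rw [take_succ_getElem l j h]
  rw [List.drop_append_of_le_length]
  simp only [List.length_take]
  omega

theorem bLoop_terminal (l : List Char) (idx : Int) (h0 : 0 ≤ idx) (fuel : Nat)
    (b : Option Int × Option (Int × Int)) (st : Int) (r : List Char) :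
    bLoop l idx fuel ((idx.toNat + 1 : Nat) : Int) b st r = finalizeSt (b, st, r) idx := by
  rw [bLoop.eq_def]
  rw [if_pos (by omega : idx + 1 ≤ ((idx.toNat + 1 : Nat) : Int))]
  rfl

theorem bLoop_eq_finalize (l : List Char) (idx : Int) (h0 : 0 ≤ idx) (hlen : idx < (l.length : Int)) :
    ∀ (fuel j : Nat), idx.toNat + 1 - j ≤ fuel → j ≤ idx.toNat + 1 →
    bLoop l idx fuel (j : Int) (stateAt l j).1 (stateAt l j).2.1 (stateAt l j).2.2
      = finalizeSt (stateAt l (idx.toNat + 1)) idx := by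
  intro fuel
  induction fuel with
  | zero =>
    intro j hn hj
    have hj' : j = idx.toNat + 1 := by omega
    subst hj'
    exact bLoop_terminal l idx h0 _ _ _ _
  | succ n ih =>
    intro j hn hj
    by_cases hje : j = idx.toNat + 1
    · subst hje
      exact bLoop_terminal l idx h0 _ _ _ _
    · have hjlen : j < l.length := by omega
      have hnot : ¬ (idx + 1 ≤ (j : Int)) := by omega
      have hget : PySem.List.pyGet? l (j : Int) = some l[j] := by
        rw [PySem.List.pyGet?_natCast, List.getElem?_eq_getElem hjlen]
      have hgd : l.getD j ' ' = l[j] := List.getD_eq_getElem l ' ' hjlen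
      have hstep : stateAt l (j + 1) = stepSt (stateAt l j) (j : Int) (l.getD j ' ') := rfl
      have ihj := ih (j + 1) (by omega) (by omega)
      rw [hstep, hgd] at ihj
      have hcast : ((j + 1 : Nat) : Int) = (j : Int) + 1 := by omega
      rw [hcast] at ihj
      rw [bLoop.eq_def]
      rw [if_neg hnot]
      simp only [hget]
      cases hre : (stateAt l j).2.2.isEmpty with
      | true =>
        by_cases hdig : PySem.Chars.isdigit l[j] = true
        · simp only [stepSt, hdig, if_true, hre] at ihj
          simp only [hdig, if_true, hre]
          exact ihj
        · have hdig' : PySem.Chars.isdigit l[j] = false := by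
            cases h : PySem.Chars.isdigit l[j] <;> simp_all
          simp only [stepSt, hdig', Bool.false_eq_true, if_false, hre, if_true] at ihj
          simp only [hdig', Bool.false_eq_true, if_false, hre, if_true]
          exact ihj
      | false =>
        by_cases hdig : PySem.Chars.isdigit l[j] = true
        · simp only [stepSt, hdig, if_true, hre, Bool.false_eq_true, if_false] at ihj
          simp only [hdig, if_true, hre, Bool.false_eq_true, if_false]
          exact ihj
        · have hdig' : PySem.Chars.isdigit l[j] = false := by
            cases h : PySem.Chars.isdigit l[j] <;> simp_all
          simp only [stepSt, hdig', Bool.false_eq_true, if_false, hre] at ihj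
          simp only [hdig', Bool.false_eq_true, if_false, hre]
          exact ihj

def InvSt (l : List Char) (j : Nat) (st8 : (Option Int × Option (Int × Int)) × Int × List Char) : Prop :=
  0 ≤ st8.2.1 ∧
  (st8.1.2 = none ∨ ∃ a b2, st8.1.2 = some (a, b2) ∧ 0 ≤ a) ∧
  (st8.2.2 = [] → (j = 0 ∨ PySem.Chars.isdigit (l.getD (j - 1) ' ') = false)) ∧
  (st8.2.2 ≠ [] →
    st8.2.2.length ≤ j ∧
    st8.2.1 = ((j - st8.2.2.length : Nat) : Int) ∧
    st8.2.2 = (l.take j).drop (j - st8.2.2.length) ∧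
    (∀ i : Nat, j - st8.2.2.length ≤ i → i < j → PySem.Chars.isdigit (l.getD i ' ') = true) ∧
    (j - st8.2.2.length = 0 ∨ PySem.Chars.isdigit (l.getD (j - st8.2.2.length - 1) ' ') = false))

theorem stateAt_inv (l : List Char) : ∀ j, j ≤ l.length → InvSt l j (stateAt l j) := by
  intro j
  induction j with
  | zero =>
    intro _
    exact ⟨le_refl 0, Or.inl rfl, fun _ => Or.inl rfl, fun h => absurd rfl h⟩
  | succ j ih =>
    intro hj
    have hjlen : j < l.length := by omega
    obtain ⟨inv1, inv2, inv3, inv4⟩ := ih (by omega)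
    have hgd : l.getD j ' ' = l[j] := List.getD_eq_getElem l ' ' hjlen
    show InvSt l (j + 1) (stepSt (stateAt l j) j (l.getD j ' '))
    by_cases hdig : PySem.Chars.isdigit (l.getD j ' ') = true
    · cases hre : (stateAt l j).2.2.isEmpty with
      | true =>
        have hrnil : (stateAt l j).2.2 = [] := List.isEmpty_iff.mp hre
        have hst8 : stepSt (stateAt l j) j (l.getD j ' ')
            = ((stateAt l j).1, ((j : Nat) : Int), [l.getD j ' ']) := by
          simp only [stepSt]
          rw [if_pos hdig, if_pos hre, hrnil, List.nil_append]
        rw [hst8]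
        refine ⟨Int.natCast_nonneg j, inv2, by simp, ?_⟩
        intro _
        have h1 : j + 1 - ([l.getD j ' '] : List Char).length = j := by simp
        refine ⟨by simp, by rw [h1], ?_, ?_, ?_⟩
        · show ([l.getD j ' '] : List Char) = (l.take (j + 1)).drop (j + 1 - ([l.getD j ' '] : List Char).length)
          rw [h1, drop_take_succ l j j hjlen (le_refl j), drop_take_self, hgd, List.nil_append]
        · intro i hi1 hi2
          rw [h1] at hi1
          have : i = j := by omega
          subst this
          exact hdig
        · rw [h1]
          rcases inv3 hrnil with h0 | hnd
          · left; omega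
          · by_cases hj0 : j = 0
            · left; omega
            · right; exact hnd
      | false =>
        have hrne : (stateAt l j).2.2 ≠ [] := by
          intro h; rw [h] at hre; simp at hre
        have hreN : ¬ ((stateAt l j).2.2.isEmpty = true) := by rw [hre]; exact Bool.false_ne_true
        obtain ⟨c1, c2, c3, c4, c5⟩ := inv4 hrne
        have hst8 : stepSt (stateAt l j) j (l.getD j ' ')
            = ((stateAt l j).1, (stateAt l j).2.1, (stateAt l j).2.2 ++ [l.getD j ' ']) := by
          simp only [stepSt]
          rw [if_pos hdig, if_neg hreN]
        rw [hst8]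
        have hL : ((stateAt l j).2.2 ++ [l.getD j ' ']).length = (stateAt l j).2.2.length + 1 := by
          simp
        have heq : j + 1 - ((stateAt l j).2.2 ++ [l.getD j ' ']).length = j - (stateAt l j).2.2.length := by
          rw [hL]; omega
        refine ⟨inv1, inv2, by simp, ?_⟩
        intro _
        refine ⟨by rw [hL]; omega, by rw [heq]; exact c2, ?_, ?_, by rw [heq]; exact c5⟩
        · show (stateAt l j).2.2 ++ [l.getD j ' ']
              = (l.take (j + 1)).drop (j + 1 - ((stateAt l j).2.2 ++ [l.getD j ' ']).length)
          rw [heq, drop_take_succ l j (j - (stateAt l j).2.2.length) hjlen (by omega), ← c3, hgd]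
        · intro i hi1 hi2
          rw [heq] at hi1
          by_cases hij : i = j
          · subst hij; exact hdig
          · exact c4 i hi1 (by omega)
    · have hdig' : PySem.Chars.isdigit (l.getD j ' ') = false := Bool.eq_false_iff.mpr hdig
      have hdigN : ¬ (PySem.Chars.isdigit (l.getD j ' ') = true) := by
        rw [hdig']; exact Bool.false_ne_true
      cases hre : (stateAt l j).2.2.isEmpty with
      | true =>
        have hst8 : stepSt (stateAt l j) j (l.getD j ' ') = stateAt l j := by
          simp only [stepSt]
          rw [if_neg hdigN, if_pos hre]
        rw [hst8]
        refine ⟨inv1, inv2, ?_, ?_⟩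
        · intro _
          right
          have h1 : j + 1 - 1 = j := by omega
          rw [h1]
          exact hdig'
        · intro hne
          exact absurd (List.isEmpty_iff.mp hre) hne
      | false =>
        have hreN : ¬ ((stateAt l j).2.2.isEmpty = true) := by rw [hre]; exact Bool.false_ne_true
        have hst8 : stepSt (stateAt l j) j (l.getD j ' ')
            = ((some (pyIntOfDigits (stateAt l j).2.2), some ((stateAt l j).2.1, (j : Int))),
               (stateAt l j).2.1, ([] : List Char)) := by
          simp only [stepSt]
          rw [if_neg hdigN, if_neg hreN]
        rw [hst8]
        refine ⟨inv1, Or.inr ⟨(stateAt l j).2.1, (j : Int), rfl, inv1⟩, ?_, ?_⟩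
        · intro _
          right
          have h1 : j + 1 - 1 = j := by omega
          rw [h1]
          exact hdig'
        · intro hne
          exact absurd rfl hne

theorem aInner_stop (l : List Char) (st : Nat) (fuel : Nat) (acc : List Char)
    (hlt : (st : Int) - 1 < (l.length : Int))
    (hb : if st = 0 then PySem.Chars.isdigit ((l.getLast?).getD ' ') = false
          else PySem.Chars.isdigit (l.getD (st - 1) ' ') = false) :
    aInner l fuel ((st : Int) - 1) acc = ((st : Int) - 1, acc) := by
  rw [aInner.eq_def]
  by_cases hst : st = 0
  · subst hst
    rw [if_pos rfl] at hb
    simp only [Nat.cast_zero, zero_sub]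
    cases l with
    | nil =>
      rw [if_pos (by simp : (-1 : Int) + ((([] : List Char)).length : Int) < 0)]
    | cons a as =>
      have hguard : ¬ ((-1 : Int) + (((a :: as) : List Char).length : Int) < 0) := by
        simp only [List.length_cons]
        omega
      rw [if_neg hguard]
      cases fuel with
      | zero => rfl
      | succ f =>
        rw [PySem.List.pyGet?_neg_one]
        cases hL : ((a :: as) : List Char).getLast? with
        | none => simp at hL
        | some c =>
          have hc : PySem.Chars.isdigit c = false := by
            rw [hL] at hb
            simpa using hb
          simp [hc]
  · rw [if_neg hst] at hb
    have hst1 : 1 ≤ st := by omega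
    have hguard : ¬ ((st : Int) - 1 + (l.length : Int) < 0) := by omega
    rw [if_neg hguard]
    cases fuel with
    | zero => rfl
    | succ f =>
      have hlt' : st - 1 < l.length := by omega
      have hge0 : (0 : Int) ≤ (st : Int) - 1 := by omega
      have hget : PySem.List.pyGet? l ((st : Int) - 1) = some l[st - 1] := by
        rw [PySem.List.pyGet?_of_nonneg (xs := l) hge0,
          show ((st : Int) - 1).toNat = st - 1 from by omega, List.getElem?_eq_getElem hlt']
      rw [hget]
      have hgd : l.getD (st - 1) ' ' = l[st - 1] := List.getD_eq_getElem l ' ' hlt'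
      rw [hgd] at hb
      simp [hb]

theorem aInner_run (l : List Char) (st : Nat) :
    ∀ (fuel : Nat) (k : Int) (acc : List Char),
    (k + 1 - (st : Int)).toNat ≤ fuel →
    (st : Int) - 1 ≤ k → k < (l.length : Int) →
    (∀ i : Nat, st ≤ i → (i : Int) ≤ k → PySem.Chars.isdigit (l.getD i ' ') = true) →
    (if st = 0 then PySem.Chars.isdigit ((l.getLast?).getD ' ') = false
     else PySem.Chars.isdigit (l.getD (st - 1) ' ') = false) →
    aInner l fuel k acc = ((st : Int) - 1, (l.take (k + 1).toNat).drop st ++ acc) := by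
  intro fuel
  induction fuel with
  | zero =>
    intro k acc hn hk1 hk2 _ hb
    have hk : k = (st : Int) - 1 := by omega
    subst hk
    rw [aInner_stop l st 0 acc hk2 hb]
    have h1 : ((st : Int) - 1 + 1).toNat = st := by omega
    rw [h1, drop_take_self, List.nil_append]
  | succ n ih =>
    intro k acc hn hk1 hk2 hdig hb
    by_cases hke : k = (st : Int) - 1
    · subst hke
      rw [aInner_stop l st (n + 1) acc hk2 hb]
      have h1 : ((st : Int) - 1 + 1).toNat = st := by omega
      rw [h1, drop_take_self, List.nil_append]
    · have hkge : (st : Int) ≤ k := by omega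
      have hk0 : (0 : Int) ≤ k := by omega
      have hklen : k.toNat < l.length := by omega
      rw [aInner.eq_def]
      have hguard : ¬ (k + (l.length : Int) < 0) := by omega
      rw [if_neg hguard]
      have hget : PySem.List.pyGet? l k = some l[k.toNat] := by
        rw [PySem.List.pyGet?_of_nonneg (xs := l) hk0, List.getElem?_eq_getElem hklen]
      rw [hget]
      have hgd : l.getD k.toNat ' ' = l[k.toNat] := List.getD_eq_getElem l ' ' hklen
      have hdk : PySem.Chars.isdigit l[k.toNat] = true := by
        rw [← hgd]
        exact hdig k.toNat (by omega) (by omega)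
      simp only [hdk, if_true]
      have ihk := ih (k - 1) (l[k.toNat] :: acc) (by omega) (by omega) (by omega)
        (fun i hi1 hi2 => hdig i hi1 (by omega)) hb
      rw [ihk]
      have h1 : (k - 1 + 1).toNat = k.toNat := by omega
      have h2 : (k + 1).toNat = k.toNat + 1 := by omega
      rw [h1, h2]
      rw [drop_take_succ l k.toNat st hklen (by omega), List.append_assoc]
      rfl

theorem aOuter_eq (l : List Char) : ∀ (j : Nat) (fuel : Nat), j < l.length → j + 1 ≤ fuel →
    (PySem.Chars.isdigit (l.getD 0 ' ') = true →
     (∀ i : Nat, i ≤ j → 1 ≤ i → PySem.Chars.isdigit (l.getD i ' ') = true →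
        PySem.Chars.isdigit (l.getD (i - 1) ' ') = true) →
     PySem.Chars.isdigit ((l.getLast?).getD ' ') = false) →
    aOuter l fuel (j : Int) = finalizeSt (stateAt l (j + 1)) (j : Int) := by
  intro j
  induction j with
  | zero =>
    intro fuel hlen hfuel hH
    obtain ⟨f, rfl⟩ : ∃ f, fuel = f + 1 := ⟨fuel - 1, by omega⟩
    have hgd : l.getD 0 ' ' = l[0] := List.getD_eq_getElem l ' ' hlen
    rw [aOuter.eq_def]
    rw [if_neg (by omega : ¬ (((0 : Nat) : Int) < 0))]
    have hget : PySem.List.pyGet? l ((0 : Nat) : Int) = some l[0] := by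
      rw [PySem.List.pyGet?_natCast, List.getElem?_eq_getElem hlen]
    rw [hget]
    have hstep : stateAt l (0 + 1) = stepSt (stateAt l 0) 0 (l.getD 0 ' ') := rfl
    by_cases hdig : PySem.Chars.isdigit l[0] = true
    · have hdigD : PySem.Chars.isdigit (l.getD 0 ' ') = true := by rw [hgd]; exact hdig
      simp only [hdig, if_true]
      have hrun := aInner_run l 0 ((((0 : Nat) : Int) + l.length + 1).toNat) ((0 : Nat) : Int) []
        (by omega) (by omega) (by omega)
        (fun i hi1 hi2 => by
          have : i = 0 := by omega
          subst this
          exact hdigD)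
        (by
          rw [if_pos rfl]
          exact hH hdigD (fun i h1 h2 _ => by omega))
      rw [hrun]
      rw [hstep]
      have hst8 : stepSt (stateAt l 0) 0 (l.getD 0 ' ')
          = ((none, none), (0 : Int), [l.getD 0 ' ']) := by
        simp only [stepSt, stateAt]
        rw [if_pos hdigD]
        rfl
      rw [hst8]
      simp only [finalizeSt]
      rw [if_neg (by simp : ¬ (([l.getD 0 ' '] : List Char).isEmpty = true))]
      have h1 : (((0 : Nat) : Int) + 1).toNat = 0 + 1 := by omega
      rw [h1]
      rw [drop_take_succ l 0 0 hlen (le_refl 0), drop_take_self, List.nil_append, List.append_nil]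
      rw [hgd]
      rw [show ((0 : Nat) : Int) - 1 + 1 = (0 : Int) from by omega]
    · have hdig' : PySem.Chars.isdigit l[0] = false := Bool.eq_false_iff.mpr hdig
      have hdigN : ¬ (PySem.Chars.isdigit (l.getD 0 ' ') = true) := by
        rw [hgd, hdig']; exact Bool.false_ne_true
      simp only [hdig', Bool.false_eq_true, if_false]
      rw [aOuter.eq_def]
      rw [if_pos (by omega : ((0 : Nat) : Int) - 1 < 0)]
      rw [hstep]
      have hst8 : stepSt (stateAt l 0) 0 (l.getD 0 ' ') = stateAt l 0 := by
        simp only [stepSt, stateAt]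
        rw [if_neg hdigN]
        rfl
      rw [hst8]
      rfl
  | succ j ihj =>
    intro fuel hlen hfuel hH
    obtain ⟨f, rfl⟩ : ∃ f, fuel = f + 1 := ⟨fuel - 1, by omega⟩
    have hjlen : j + 1 < l.length := hlen
    have hgd : l.getD (j + 1) ' ' = l[j + 1] := List.getD_eq_getElem l ' ' hjlen
    rw [aOuter.eq_def]
    rw [if_neg (by omega : ¬ (((j + 1 : Nat) : Int) < 0))]
    have hget : PySem.List.pyGet? l ((j + 1 : Nat) : Int) = some l[j + 1] := by
      rw [PySem.List.pyGet?_natCast, List.getElem?_eq_getElem hjlen]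
    rw [hget]
    obtain ⟨inv1, inv2, inv3, inv4⟩ := stateAt_inv l (j + 1) (by omega)
    have hstep : stateAt l (j + 1 + 1)
        = stepSt (stateAt l (j + 1)) ((j + 1 : Nat) : Int) (l.getD (j + 1) ' ') := rfl
    by_cases hdig : PySem.Chars.isdigit l[j + 1] = true
    · have hdigD : PySem.Chars.isdigit (l.getD (j + 1) ' ') = true := by rw [hgd]; exact hdig
      simp only [hdig, if_true]
      cases hre : (stateAt l (j + 1)).2.2.isEmpty with
      | true =>
        have hrnil : (stateAt l (j + 1)).2.2 = [] := List.isEmpty_iff.mp hre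
        have hbound : if j + 1 = 0 then PySem.Chars.isdigit ((l.getLast?).getD ' ') = false
            else PySem.Chars.isdigit (l.getD (j + 1 - 1) ' ') = false := by
          rw [if_neg (by omega)]
          rcases inv3 hrnil with h0 | hnd
          · omega
          · simpa using hnd
        have hrun := aInner_run l (j + 1) ((((j + 1 : Nat) : Int) + l.length + 1).toNat)
          ((j + 1 : Nat) : Int) [] (by omega) (by omega) (by omega)
          (fun i hi1 hi2 => by
            have : i = j + 1 := by omega
            subst this
            exact hdigD) hbound
        rw [hrun]
        rw [hstep]
        have hst8 : stepSt (stateAt l (j + 1)) ((j + 1 : Nat) : Int) (l.getD (j + 1) ' ')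
            = ((stateAt l (j + 1)).1, ((j + 1 : Nat) : Int), [l.getD (j + 1) ' ']) := by
          simp only [stepSt]
          rw [if_pos hdigD, if_pos hre, hrnil, List.nil_append]
        rw [hst8]
        simp only [finalizeSt]
        rw [if_neg (by simp : ¬ (([l.getD (j + 1) ' '] : List Char).isEmpty = true))]
        have h1 : (((j + 1 : Nat) : Int) + 1).toNat = (j + 1) + 1 := by omega
        rw [h1]
        rw [drop_take_succ l (j + 1) (j + 1) hjlen (le_refl _), drop_take_self, List.nil_append,
          List.append_nil]
        rw [hgd]
        rw [show ((j + 1 : Nat) : Int) - 1 + 1 = ((j + 1 : Nat) : Int) from by omega]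
      | false =>
        have hrne : (stateAt l (j + 1)).2.2 ≠ [] := by
          intro h; rw [h] at hre; simp at hre
        have hreN : ¬ ((stateAt l (j + 1)).2.2.isEmpty = true) := by
          rw [hre]; exact Bool.false_ne_true
        obtain ⟨c1, c2, c3, c4, c5⟩ := inv4 hrne
        have hjj : 1 ≤ (stateAt l (j + 1)).2.2.length := by
          cases h : (stateAt l (j + 1)).2.2 with
          | nil => exact absurd h hrne
          | cons a as => simp [h]
        have hdown : j + 1 - (stateAt l (j + 1)).2.2.length = 0 →
            (∀ i : Nat, i ≤ j + 1 → 1 ≤ i → PySem.Chars.isdigit (l.getD i ' ') = true →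
              PySem.Chars.isdigit (l.getD (i - 1) ' ') = true) := by
          intro h0 i hi1 hi2 hdi
          by_cases hii : i ≤ j
          · exact c4 (i - 1) (by omega) (by omega)
          · have : i = j + 1 := by omega
            subst this
            exact c4 j (by omega) (by omega)
        have hbound : if j + 1 - (stateAt l (j + 1)).2.2.length = 0 then
              PySem.Chars.isdigit ((l.getLast?).getD ' ') = false
            else PySem.Chars.isdigit (l.getD (j + 1 - (stateAt l (j + 1)).2.2.length - 1) ' ') = false := by
          rcases c5 with h0 | hnd
          · rw [if_pos h0]
            exact hH (c4 0 (by omega) (by omega)) (hdown h0)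
          · by_cases h0 : j + 1 - (stateAt l (j + 1)).2.2.length = 0
            · rw [if_pos h0]
              exact hH (c4 0 (by omega) (by omega)) (hdown h0)
            · rw [if_neg h0]
              exact hnd
        have hrun := aInner_run l (j + 1 - (stateAt l (j + 1)).2.2.length)
          ((((j + 1 : Nat) : Int) + l.length + 1).toNat)
          ((j + 1 : Nat) : Int) [] (by omega) (by omega) (by omega)
          (fun i hi1 hi2 => by
            by_cases hij : i ≤ j
            · exact c4 i (by omega) (by omega)
            · have : i = j + 1 := by omega
              subst this
              exact hdigD) hbound
        rw [hrun]
        rw [hstep]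
        have hst8 : stepSt (stateAt l (j + 1)) ((j + 1 : Nat) : Int) (l.getD (j + 1) ' ')
            = ((stateAt l (j + 1)).1, (stateAt l (j + 1)).2.1,
               (stateAt l (j + 1)).2.2 ++ [l.getD (j + 1) ' ']) := by
          simp only [stepSt]
          rw [if_pos hdigD, if_neg hreN]
        rw [hst8]
        simp only [finalizeSt]
        rw [if_neg (by simp : ¬ ((((stateAt l (j + 1)).2.2 ++ [l.getD (j + 1) ' ']) : List Char).isEmpty = true))]
        have h1 : (((j + 1 : Nat) : Int) + 1).toNat = (j + 1) + 1 := by omega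
        rw [h1]
        have hslice : (l.take ((j + 1) + 1)).drop (j + 1 - (stateAt l (j + 1)).2.2.length)
            = (stateAt l (j + 1)).2.2 ++ [l[j + 1]] := by
          rw [drop_take_succ l (j + 1) (j + 1 - (stateAt l (j + 1)).2.2.length) hjlen (by omega), ← c3]
        rw [hslice, List.append_nil, hgd]
        rw [show ((j + 1 - (stateAt l (j + 1)).2.2.length : Nat) : Int) - 1 + 1
            = ((j + 1 - (stateAt l (j + 1)).2.2.length : Nat) : Int) from by omega]
        rw [← c2]
    · have hdig' : PySem.Chars.isdigit l[j + 1] = false := Bool.eq_false_iff.mpr hdig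
      have hdigN : ¬ (PySem.Chars.isdigit (l.getD (j + 1) ' ') = true) := by
        rw [hgd, hdig']; exact Bool.false_ne_true
      simp only [hdig', Bool.false_eq_true, if_false]
      have hcast : ((j + 1 : Nat) : Int) - 1 = ((j : Nat) : Int) := by omega
      rw [hcast]
      have hH' : PySem.Chars.isdigit (l.getD 0 ' ') = true →
          (∀ i : Nat, i ≤ j → 1 ≤ i → PySem.Chars.isdigit (l.getD i ' ') = true →
            PySem.Chars.isdigit (l.getD (i - 1) ' ') = true) →
          PySem.Chars.isdigit ((l.getLast?).getD ' ') = false := by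
        intro h0 hdcl
        apply hH h0
        intro i hi1 hi2 hdi
        by_cases hij : i ≤ j
        · exact hdcl i hij hi2 hdi
        · have : i = j + 1 := by omega
          subst this
          rw [hgd] at hdi
          rw [hdi] at hdig'
          simp at hdig'
      rw [ihj f (by omega) (by omega) hH']
      rw [hstep]
      cases hre : (stateAt l (j + 1)).2.2.isEmpty with
      | true =>
        have hst8 : stepSt (stateAt l (j + 1)) ((j + 1 : Nat) : Int) (l.getD (j + 1) ' ')
            = stateAt l (j + 1) := by
          simp only [stepSt]
          rw [if_neg hdigN, if_pos hre]
        rw [hst8]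
        simp only [finalizeSt]
        rw [if_pos hre, if_pos hre]
      | false =>
        have hreN : ¬ ((stateAt l (j + 1)).2.2.isEmpty = true) := by
          rw [hre]; exact Bool.false_ne_true
        have hst8 : stepSt (stateAt l (j + 1)) ((j + 1 : Nat) : Int) (l.getD (j + 1) ' ')
            = ((some (pyIntOfDigits (stateAt l (j + 1)).2.2),
                some ((stateAt l (j + 1)).2.1, ((j + 1 : Nat) : Int))),
               (stateAt l (j + 1)).2.1, ([] : List Char)) := by
          simp only [stepSt]
          rw [if_neg hdigN, if_neg hreN]
        rw [hst8]
        simp only [finalizeSt]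
        rw [if_neg hreN, if_pos (List.isEmpty_nil : (([] : List Char)).isEmpty = true)]
        rw [show ((j : Nat) : Int) + 1 = ((j + 1 : Nat) : Int) from by omega]

theorem get_last_value_spec : Claim_unchanged_get_last_value := by
  intro s idx _hdom hpre
  unfold Spec_get_last_value
  intro hnD
  unfold get_last_value get_last_value_alt
  obtain ⟨hlen, hall⟩ := hpre
  by_cases h0 : idx < 0
  · rw [aOuter.eq_def, bLoop.eq_def]
    rw [if_pos h0, if_pos (by omega : idx + 1 ≤ (0 : Int))]
    rfl
  · have h0' : (0 : Int) ≤ idx := by omega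
    have hH : PySem.Chars.isdigit (s.toList.getD 0 ' ') = true →
        (∀ i : Nat, i ≤ idx.toNat → 1 ≤ i →
          PySem.Chars.isdigit (s.toList.getD i ' ') = true →
          PySem.Chars.isdigit (s.toList.getD (i - 1) ' ') = true) →
        PySem.Chars.isdigit ((s.toList.getLast?).getD ' ') = false := by
      intro hd0 hdcl
      by_contra hlast
      have hlast' : PySem.Chars.isdigit ((s.toList.getLast?).getD ' ') = true := by
        cases h : PySem.Chars.isdigit ((s.toList.getLast?).getD ' ')
        · exact absurd h hlast
        · rfl
      exact hnD ⟨h0', hlen, hd0, hdcl, hlast', hall h0'⟩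
    have hjlen : idx.toNat < s.toList.length := by omega
    have ha := aOuter_eq s.toList idx.toNat ((idx + 1).toNat) hjlen (by omega) hH
    rw [Int.toNat_of_nonneg h0'] at ha
    have hb : bLoop s.toList idx ((idx + 1).toNat) 0 (none, none) 0 []
        = finalizeSt (stateAt s.toList (idx.toNat + 1)) idx :=
      bLoop_eq_finalize s.toList idx h0' hlen ((idx + 1).toNat) 0 (by omega) (by omega)
    rw [ha]
    exact hb.symm

-- tightness machinery: inside D_, A's span start is negative while B's is never negative

theorem aInner_fst_le (l : List Char) : ∀ (fuel : Nat) (k : Int) (acc : List Char),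
    (aInner l fuel k acc).1 ≤ k := by
  intro fuel
  induction fuel with
  | zero =>
    intro k acc
    rw [aInner.eq_def]
    by_cases hguard : k + (l.length : Int) < 0
    · rw [if_pos hguard]
    · rw [if_neg hguard]
  | succ n ih =>
    intro k acc
    rw [aInner.eq_def]
    by_cases hguard : k + (l.length : Int) < 0
    · rw [if_pos hguard]
    · rw [if_neg hguard]
      cases hget : PySem.List.pyGet? l k with
      | none => simp
      | some c =>
        by_cases hdig : PySem.Chars.isdigit c = true
        · simp only [hdig, if_true]
          have := ih (k - 1) (c :: acc)
          omega
        · simp [hdig]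

theorem aInner_all_digits (l : List Char) : ∀ (k : Nat) (fuel : Nat), k < l.length →
    k + 1 ≤ fuel →
    (∀ i : Nat, i ≤ k → PySem.Chars.isdigit (l.getD i ' ') = true) →
    ∀ acc, aInner l fuel (k : Int) acc = aInner l (fuel - (k + 1)) (-1) (l.take (k + 1) ++ acc) := by
  intro k
  induction k with
  | zero =>
    intro fuel hlen hfuel hdig acc
    obtain ⟨f, rfl⟩ : ∃ f, fuel = f + 1 := ⟨fuel - 1, by omega⟩
    rw [aInner.eq_def]
    rw [if_neg (by omega : ¬ (((0 : Nat) : Int) + (l.length : Int) < 0))]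
    have hget : PySem.List.pyGet? l ((0 : Nat) : Int) = some l[0] := by
      rw [PySem.List.pyGet?_natCast, List.getElem?_eq_getElem hlen]
    rw [hget]
    have hgd : l.getD 0 ' ' = l[0] := List.getD_eq_getElem l ' ' hlen
    have hd := hdig 0 (le_refl 0)
    rw [hgd] at hd
    simp only [hd, if_true]
    have h2 : l.take 1 = [l[0]] := by
      rw [show (1 : Nat) = 0 + 1 from rfl, take_succ_getElem l 0 hlen]
      rfl
    rw [h2]
    rw [show ((0 : Nat) : Int) - 1 = (-1 : Int) from by omega]
    rw [show f + 1 - (0 + 1) = f from by omega]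
    rfl
  | succ k ihk =>
    intro fuel hlen hfuel hdig acc
    obtain ⟨f, rfl⟩ : ∃ f, fuel = f + 1 := ⟨fuel - 1, by omega⟩
    rw [aInner.eq_def]
    rw [if_neg (by omega : ¬ (((k + 1 : Nat) : Int) + (l.length : Int) < 0))]
    have hget : PySem.List.pyGet? l ((k + 1 : Nat) : Int) = some l[k + 1] := by
      rw [PySem.List.pyGet?_natCast, List.getElem?_eq_getElem hlen]
    rw [hget]
    have hgd : l.getD (k + 1) ' ' = l[k + 1] := List.getD_eq_getElem l ' ' hlen
    have hd := hdig (k + 1) (le_refl _)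
    rw [hgd] at hd
    simp only [hd, if_true]
    rw [show ((k + 1 : Nat) : Int) - 1 = ((k : Nat) : Int) from by omega]
    rw [ihk f (by omega) (by omega) (fun i hi => hdig i (by omega)) (l[k + 1] :: acc)]
    rw [take_succ_getElem l (k + 1) hlen, List.append_assoc]
    rw [show f - (k + 1) = f + 1 - (k + 1 + 1) from by omega]
    rfl

theorem aOuter_neg_inside (l : List Char) : ∀ (j : Nat) (fuel : Nat), j < l.length → j + 1 ≤ fuel →
    PySem.Chars.isdigit (l.getD 0 ' ') = true →
    (∀ i : Nat, i ≤ j → 1 ≤ i → PySem.Chars.isdigit (l.getD i ' ') = true →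
      PySem.Chars.isdigit (l.getD (i - 1) ' ') = true) →
    PySem.Chars.isdigit ((l.getLast?).getD ' ') = true →
    ∃ v a b2, aOuter l fuel (j : Int) = (some v, some (a, b2)) ∧ a < 0 := by
  have main : ∀ (j : Nat), j < l.length →
      (∀ i : Nat, i ≤ j → PySem.Chars.isdigit (l.getD i ' ') = true) →
      PySem.Chars.isdigit ((l.getLast?).getD ' ') = true →
      (aInner l ((((j : Nat) : Int) + l.length + 1).toNat) ((j : Nat) : Int) []).1 < -1 := by
    intro j hjlen hall hlast
    have hlen1 : 1 ≤ l.length := by omega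
    rw [aInner_all_digits l j ((((j : Nat) : Int) + l.length + 1).toNat) hjlen (by omega) hall []]
    obtain ⟨g, hg⟩ : ∃ g, (((j : Nat) : Int) + l.length + 1).toNat - (j + 1) = g + 1 :=
      ⟨(((j : Nat) : Int) + l.length + 1).toNat - (j + 1) - 1, by omega⟩
    rw [hg]
    rw [aInner.eq_def]
    rw [if_neg (by omega : ¬ ((-1 : Int) + (l.length : Int) < 0))]
    rw [PySem.List.pyGet?_neg_one]
    cases hL : l.getLast? with
    | none =>
      rw [List.getLast?_eq_none_iff] at hL
      subst hL
      simp at hjlen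
    | some c =>
      have hc : PySem.Chars.isdigit c = true := by
        rw [hL] at hlast
        simpa using hlast
      simp only [hc, if_true]
      have := aInner_fst_le l g ((-1 : Int) - 1) (c :: (l.take (j + 1) ++ []))
      omega
  intro j
  induction j with
  | zero =>
    intro fuel hlen hfuel h0 _ hlast
    obtain ⟨f, rfl⟩ : ∃ f, fuel = f + 1 := ⟨fuel - 1, by omega⟩
    rw [aOuter.eq_def]
    rw [if_neg (by omega : ¬ (((0 : Nat) : Int) < 0))]
    have hget : PySem.List.pyGet? l ((0 : Nat) : Int) = some l[0] := by
      rw [PySem.List.pyGet?_natCast, List.getElem?_eq_getElem hlen]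
    rw [hget]
    have hgd : l.getD 0 ' ' = l[0] := List.getD_eq_getElem l ' ' hlen
    have hd0 : PySem.Chars.isdigit l[0] = true := by rw [← hgd]; exact h0
    simp only [hd0, if_true]
    refine ⟨_, _, _, rfl, ?_⟩
    have := main 0 hlen (fun i hi => by
      have : i = 0 := by omega
      subst this
      exact h0) hlast
    omega
  | succ j ihj =>
    intro fuel hlen hfuel h0 hdcl hlast
    obtain ⟨f, rfl⟩ : ∃ f, fuel = f + 1 := ⟨fuel - 1, by omega⟩
    have hjlen : j + 1 < l.length := hlen
    rw [aOuter.eq_def]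
    rw [if_neg (by omega : ¬ (((j + 1 : Nat) : Int) < 0))]
    have hget : PySem.List.pyGet? l ((j + 1 : Nat) : Int) = some l[j + 1] := by
      rw [PySem.List.pyGet?_natCast, List.getElem?_eq_getElem hjlen]
    rw [hget]
    have hgd : l.getD (j + 1) ' ' = l[j + 1] := List.getD_eq_getElem l ' ' hjlen
    by_cases hdig : PySem.Chars.isdigit l[j + 1] = true
    · simp only [hdig, if_true]
      have hdownall : ∀ i : Nat, i ≤ j + 1 → PySem.Chars.isdigit (l.getD i ' ') = true := by
        have key : ∀ d : Nat, ∀ i : Nat, i ≤ j + 1 → j + 1 - i ≤ d →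
            PySem.Chars.isdigit (l.getD i ' ') = true := by
          intro d
          induction d with
          | zero =>
            intro i hi1 hi2
            have : i = j + 1 := by omega
            subst this
            rw [hgd]
            exact hdig
          | succ d ihd =>
            intro i hi1 hi2
            by_cases hij : i = j + 1
            · subst hij
              rw [hgd]
              exact hdig
            · have hd1 := ihd (i + 1) (by omega) (by omega)
              have h2 := hdcl (i + 1) (by omega) (by omega) hd1
              simpa using h2
        intro i hi
        exact key (j + 1) i hi (by omega)
      refine ⟨_, _, _, rfl, ?_⟩
      have := main (j + 1) hjlen hdownall hlast
      omega
    · have hdig' : PySem.Chars.isdigit l[j + 1] = false := Bool.eq_false_iff.mpr hdig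
      simp only [hdig', Bool.false_eq_true, if_false]
      rw [show ((j + 1 : Nat) : Int) - 1 = ((j : Nat) : Int) from by omega]
      exact ihj f (by omega) (by omega) h0 (fun i hi1 hi2 hdi => hdcl i (by omega) hi2 hdi) hlast

theorem get_last_value_tight : Claim_exact_get_last_value := by
  intro s idx _hdom hpre hd
  obtain ⟨hd0, hdlen, hdfirst, hddcl, hdlast, _hdall⟩ := hd
  intro heq
  unfold get_last_value get_last_value_alt at heq
  have hjlen : idx.toNat < s.toList.length := by omega
  obtain ⟨v, a, b2, hA, hneg⟩ := aOuter_neg_inside s.toList idx.toNat ((idx + 1).toNat) hjlen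
    (by omega) hdfirst hddcl hdlast
  rw [Int.toNat_of_nonneg hd0] at hA
  have hb : bLoop s.toList idx ((idx + 1).toNat) 0 (none, none) 0 []
      = finalizeSt (stateAt s.toList (idx.toNat + 1)) idx :=
    bLoop_eq_finalize s.toList idx hd0 hdlen ((idx + 1).toNat) 0 (by omega) (by omega)
  rw [hA, hb] at heq
  obtain ⟨inv1, inv2, _inv3, inv4⟩ := stateAt_inv s.toList (idx.toNat + 1) (by omega)
  cases hre : (stateAt s.toList (idx.toNat + 1)).2.2.isEmpty with
  | true =>
    rw [show finalizeSt (stateAt s.toList (idx.toNat + 1)) idx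
        = (stateAt s.toList (idx.toNat + 1)).1 from by
      simp only [finalizeSt]; rw [if_pos hre]] at heq
    rcases inv2 with hnone | ⟨a2, b22, hsome, ha2⟩
    · have h2 : (some (a, b2) : Option (Int × Int)) = none := by
        rw [← hnone]
        exact congrArg Prod.snd heq
      simp at h2
    · have h2 : (some (a, b2) : Option (Int × Int)) = some (a2, b22) := by
        rw [← hsome]
        exact congrArg Prod.snd heq
      simp at h2
      omega
  | false =>
    have hreN : ¬ ((stateAt s.toList (idx.toNat + 1)).2.2.isEmpty = true) := by
      rw [hre]; exact Bool.false_ne_true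
    rw [show finalizeSt (stateAt s.toList (idx.toNat + 1)) idx
        = (some (pyIntOfDigits (stateAt s.toList (idx.toNat + 1)).2.2),
           some ((stateAt s.toList (idx.toNat + 1)).2.1, idx + 1)) from by
      simp only [finalizeSt]; rw [if_neg hreN]] at heq
    have h2 : (some (a, b2) : Option (Int × Int))
        = some ((stateAt s.toList (idx.toNat + 1)).2.1, idx + 1) :=
      congrArg Prod.snd heq
    simp at h2
    omega

-- ===== VERDICT (statements are the Claim_ definitions above) =====
theorem get_last_value_changed : Claim_changed_get_last_value := by
  unfold Claim_changed_get_last_value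
  decide
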